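-- pv_equiv track=rewrite | github.com/adithya1012/LeetCode | amazon_QA12.py | solve
-- ===== SOURCE A (Python) =====
-- def solve(inventory, dispatch1, dispatch2, skip):
--     total = dispatch1 + dispatch2
--     ans = 0
--     skips = []
--
--     for i in inventory:
--         i %= total
--         if 0 < i <= dispatch1:
--             ans += 1
--         else:
--             i = dispatch2 if i == 0 else i - dispatch1
--             skips.append((i + dispatch1 - 1) // dispatch1)
--
--     skips.sort()
--     for s in skips:
--         if s > skip:
--             break
--         ans += 1
--         skip -= s
--
--     return ans
-- ===== SOURCE B (Python) =====
-- def solve(inventory, dispatch1, dispatch2, skip):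
--     total = dispatch1 + dispatch2
--     ans = 0
--     counts = {}
--     for x in inventory:
--         r = x % total
--         if 0 < r <= dispatch1:
--             ans += 1
--         else:
--             c = ((dispatch2 if r == 0 else r - dispatch1) + dispatch1 - 1) // dispatch1
--             counts[c] = counts.get(c, 0) + 1
--     for c in sorted(counts):
--         k = counts[c]
--         if c > skip:
--             break
--         if c <= 0:
--             ans += k
--             skip -= k * c
--         else:
--             t = skip // c
--             if t >= k:
--                 ans += k
--                 skip -= k * c
--             else:
--                 ans += t
--                 break
--     return ans
-- ===== Notes on version B (the rewrite author's own statement) =====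
-- stated objective: alternative
-- what changed: Skip costs are aggregated into a dict counter instead of a flat list; only the distinct cost values are sorted, and each group of equal costs is consumed in one step by a floor division of the remaining budget instead of A's per-item subtract-and-break loop.
import Mathlib
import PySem

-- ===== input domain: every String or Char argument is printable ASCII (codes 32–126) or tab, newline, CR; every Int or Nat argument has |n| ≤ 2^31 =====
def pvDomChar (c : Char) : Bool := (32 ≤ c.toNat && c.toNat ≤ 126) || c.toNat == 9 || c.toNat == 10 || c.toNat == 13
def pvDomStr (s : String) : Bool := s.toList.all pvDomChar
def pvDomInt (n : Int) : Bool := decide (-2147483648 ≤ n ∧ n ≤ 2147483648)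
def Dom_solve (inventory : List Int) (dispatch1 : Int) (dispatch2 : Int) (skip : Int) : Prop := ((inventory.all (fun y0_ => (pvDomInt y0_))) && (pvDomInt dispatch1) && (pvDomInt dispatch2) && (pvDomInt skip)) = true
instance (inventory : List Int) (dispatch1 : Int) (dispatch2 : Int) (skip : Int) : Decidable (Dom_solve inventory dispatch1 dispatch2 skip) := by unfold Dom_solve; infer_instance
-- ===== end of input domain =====

-- B aggregates the skip costs in a dict counter, sorts only the distinct cost values,
-- and consumes each group of equal costs in one step by a floor division of the budget,
-- replacing A's flat sorted list and per-item subtract-and-break loop (objective: alternative).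

-- ===== PORT A =====
-- A's greedy consumption loop: break on s > skip, else count and subtract.
def solveGreedy : List Int → Int → Int
  | [], _ => 0
  | s :: rest, skip => if s > skip then 0 else 1 + solveGreedy rest (skip - s)

def solve (inventory : List Int) (dispatch1 : Int) (dispatch2 : Int) (skip : Int) : Int :=
  let total := dispatch1 + dispatch2
  let st := inventory.foldl (fun (st : Int × List Int) x =>
    let i := PySem.Int.mod x total
    if 0 < i ∧ i ≤ dispatch1 then (st.1 + 1, st.2)
    else
      let i2 := if i = 0 then dispatch2 else i - dispatch1
      (st.1, st.2 ++ [PySem.Int.floordiv (i2 + dispatch1 - 1) dispatch1])) (0, [])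
  let skips := PySem.List.sorted st.2 (fun x => x) false
  st.1 + solveGreedy skips skip

-- ===== PORT B =====
-- B's loop over the sorted distinct cost values: break on c > skip; a group of k equal
-- costs c is taken wholly (budget -= k*c) or partially (skip // c of them), then break.
def altLoop (counts : PySem.Dict Int Int) : List Int → Int → Int
  | [], _ => 0
  | c :: cs, skip =>
    let k := counts.getD c 0
    if c > skip then 0
    else if c ≤ 0 then k + altLoop counts cs (skip - k * c)
    else
      let t := PySem.Int.floordiv skip c
      if t ≥ k then k + altLoop counts cs (skip - k * c)
      else t

def solve_alt (inventory : List Int) (dispatch1 : Int) (dispatch2 : Int) (skip : Int) : Int :=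
  let total := dispatch1 + dispatch2
  let st := inventory.foldl (fun (st : Int × PySem.Dict Int Int) x =>
    let r := PySem.Int.mod x total
    if 0 < r ∧ r ≤ dispatch1 then (st.1 + 1, st.2)
    else
      let c := PySem.Int.floordiv ((if r = 0 then dispatch2 else r - dispatch1) + dispatch1 - 1) dispatch1
      (st.1, st.2.insert c (st.2.getD c 0 + 1))) (0, PySem.Dict.empty)
  st.1 + altLoop st.2 (PySem.List.sorted st.2.keys (fun x => x) false) skip

-- ===== PRECONDITION & SPEC =====
-- Pre_ excludes exactly the inputs where Python A raises ZeroDivisionError: a nonempty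
-- inventory with dispatch1+dispatch2 = 0 (the `%` in the loop) or with dispatch1 = 0
-- (every element then reaches the `//` with a zero divisor).
def Pre_solve (inventory : List Int) (dispatch1 : Int) (dispatch2 : Int) (skip : Int) : Prop :=
  inventory = [] ∨ (dispatch1 + dispatch2 ≠ 0 ∧ dispatch1 ≠ 0)
instance (inventory : List Int) (dispatch1 : Int) (dispatch2 : Int) (skip : Int) : Decidable (Pre_solve inventory dispatch1 dispatch2 skip) := by unfold Pre_solve; infer_instance
def pvWitness_solve : List Int × Int × Int × Int := ([3, 7, 0, -2], 2, 3, 4)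

def Spec_solve (inventory : List Int) (dispatch1 : Int) (dispatch2 : Int) (skip : Int) (out : Int) : Prop := out = solve_alt inventory dispatch1 dispatch2 skip
instance (inventory : List Int) (dispatch1 : Int) (dispatch2 : Int) (skip : Int) (out : Int) : Decidable (Spec_solve inventory dispatch1 dispatch2 skip out) := by unfold Spec_solve; infer_instance

-- ===== CLAIM =====
def Claim_equal_solve : Prop := ∀ (inventory : List Int) (dispatch1 : Int) (dispatch2 : Int) (skip : Int), Dom_solve inventory dispatch1 dispatch2 skip → Pre_solve inventory dispatch1 dispatch2 skip → Spec_solve inventory dispatch1 dispatch2 skip (solve inventory dispatch1 dispatch2 skip)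

-- ===== LEMMAS AND PROOFS =====

-- A's classification fold: running count plus appended cost list.
theorem fold_classify_a (d1 d2 total : Int) (l : List Int) (a : Int) (sk : List Int) :
    l.foldl (fun (st : Int × List Int) x =>
      let i := PySem.Int.mod x total
      if 0 < i ∧ i ≤ d1 then (st.1 + 1, st.2)
      else
        let i2 := if i = 0 then d2 else i - d1
        (st.1, st.2 ++ [PySem.Int.floordiv (i2 + d1 - 1) d1])) (a, sk)
    = (a + ((l.map (fun x => PySem.Int.mod x total)).countP (fun r => decide (0 < r ∧ r ≤ d1)) : Int),
       sk ++ ((l.map (fun x => PySem.Int.mod x total)).filter (fun r => !decide (0 < r ∧ r ≤ d1))).map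
         (fun r => PySem.Int.floordiv ((if r = 0 then d2 else r - d1) + d1 - 1) d1)) := by
  induction l generalizing a sk with
  | nil => simp
  | cons x xs ih =>
    simp only [List.foldl_cons, List.map_cons, List.countP_cons, List.filter_cons]
    by_cases h : 0 < PySem.Int.mod x total ∧ PySem.Int.mod x total ≤ d1
    · simp [h, ih]; ring_nf
    · simp [h, ih]

-- B's classification fold: same running count, costs aggregated into the counter dict.
theorem fold_classify_b (d1 d2 total : Int) (l : List Int) (a : Int) (d : PySem.Dict Int Int) :
    l.foldl (fun (st : Int × PySem.Dict Int Int) x =>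
      let r := PySem.Int.mod x total
      if 0 < r ∧ r ≤ d1 then (st.1 + 1, st.2)
      else
        let c := PySem.Int.floordiv ((if r = 0 then d2 else r - d1) + d1 - 1) d1
        (st.1, st.2.insert c (st.2.getD c 0 + 1))) (a, d)
    = (a + ((l.map (fun x => PySem.Int.mod x total)).countP (fun r => decide (0 < r ∧ r ≤ d1)) : Int),
       (((l.map (fun x => PySem.Int.mod x total)).filter (fun r => !decide (0 < r ∧ r ≤ d1))).map
         (fun r => PySem.Int.floordiv ((if r = 0 then d2 else r - d1) + d1 - 1) d1)).foldl
         (fun d c => d.insert c (d.getD c 0 + 1)) d) := by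
  induction l generalizing a d with
  | nil => simp
  | cons x xs ih =>
    simp only [List.foldl_cons, List.map_cons, List.countP_cons, List.filter_cons]
    by_cases h : 0 < PySem.Int.mod x total ∧ PySem.Int.mod x total ≤ d1
    · simp [h, ih]; ring_nf
    · simp [h, ih]

-- a flatMap of count-many replicates over a nodup key list with the right membership is a permutation
theorem flat_replicate_perm (L ks : List Int) (hnd : ks.Nodup)
    (hmem : ∀ c, c ∈ ks ↔ c ∈ L) :
    (ks.flatMap (fun c => List.replicate (L.count c) c)).Perm L := by
  rw [List.perm_iff_count]
  intro a
  have hcount : (ks.flatMap (fun c => List.replicate (L.count c) c)).count a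
      = if a ∈ ks then L.count a else 0 := by
    clear hmem
    induction ks with
    | nil => simp
    | cons c cs ih =>
      have hnd' := hnd.of_cons
      simp only [List.flatMap_cons, List.count_append, List.mem_cons, ih hnd']
      by_cases hac : a = c
      · subst hac
        have : a ∉ cs := (List.nodup_cons.mp hnd).1
        simp [this]
      · simp [List.count_replicate, Ne.symm hac, hac]
  rw [hcount]
  by_cases h : a ∈ ks
  · simp [h]
  · have : a ∉ L := fun hL => h ((hmem a).mpr hL)
    simp [h, List.count_eq_zero_of_not_mem this]

-- a flatMap of replicates over a strictly increasing key list is sorted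
theorem flat_replicate_pairwise (L ks : List Int) (hlt : ks.Pairwise (· < ·)) :
    (ks.flatMap (fun c => List.replicate (L.count c) c)).Pairwise (· ≤ ·) := by
  induction ks with
  | nil => simp
  | cons c cs ih =>
    simp only [List.flatMap_cons]
    rw [List.pairwise_append]
    refine ⟨List.pairwise_replicate.mpr (Or.inr le_rfl), ih hlt.of_cons, ?_⟩
    intro x hx y hy
    have hxc : x = c := List.eq_of_mem_replicate hx
    obtain ⟨c', hc', hy'⟩ := List.mem_flatMap.mp hy
    have hyc : y = c' := List.eq_of_mem_replicate hy'
    have : c < c' := (List.pairwise_cons.mp hlt).1 c' hc'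
    omega

-- the greedy loop on a block of k ≥ 1 equal costs c, in B's case shape
theorem greedy_group (c : Int) (k : Nat) (hk : 1 ≤ k) (rest : List Int) (sk : Int) :
    solveGreedy (List.replicate k c ++ rest) sk =
      if c > sk then 0
      else if c ≤ 0 then (k : Int) + solveGreedy rest (sk - k * c)
      else if PySem.Int.floordiv sk c ≥ (k : Int) then (k : Int) + solveGreedy rest (sk - k * c)
      else PySem.Int.floordiv sk c := by
  induction k generalizing sk with
  | zero => omega
  | succ k ih =>
    by_cases hcs : c > sk
    · rw [if_pos hcs]
      simp [List.replicate_succ, solveGreedy, hcs]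
    · rw [if_neg hcs]
      rw [not_lt] at hcs
      by_cases hk0 : k = 0
      · subst hk0
        simp only [List.replicate, List.singleton_append, solveGreedy,
          if_neg (by omega : ¬ c > sk)]
        by_cases hc0 : c ≤ 0
        · rw [if_pos hc0]; push_cast; ring_nf
        · rw [if_neg hc0]
          have hc0' : 0 < c := by omega
          have h1 : (1 : Int) ≤ PySem.Int.floordiv sk c :=
            (PySem.Int.le_floordiv_iff_mul_le hc0').mpr (by omega)
          rw [if_pos (by push_cast; omega)]
          push_cast; ring_nf
      · have hk1 : 1 ≤ k := by omega
        rw [List.replicate_succ, List.cons_append]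
        simp only [solveGreedy, if_neg (by omega : ¬ c > sk)]
        rw [ih hk1 (sk - c)]
        by_cases hc0 : c ≤ 0
        · rw [if_neg (by omega : ¬ c > sk - c), if_pos hc0, if_pos hc0]
          push_cast; ring_nf
        · have hc0' : 0 < c := by omega
          rw [if_neg hc0, if_neg hc0]
          have hdiv : PySem.Int.floordiv (sk - c) c = PySem.Int.floordiv sk c - 1 := by
            rw [PySem.Int.floordiv_eq_ediv_of_pos hc0', PySem.Int.floordiv_eq_ediv_of_pos hc0']
            have h : sk - c = sk + (-1) * c := by ring
            rw [h, Int.add_mul_ediv_right _ _ (by omega : c ≠ 0)]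
            omega
          have h1 : (1 : Int) ≤ PySem.Int.floordiv sk c :=
            (PySem.Int.le_floordiv_iff_mul_le hc0').mpr (by omega)
          by_cases hsk2 : c > sk - c
          · have ht1 : PySem.Int.floordiv sk c = 1 := by
              rw [PySem.Int.floordiv_eq_iff_of_pos hc0']
              constructor <;> omega
            rw [if_pos hsk2, ht1, if_neg (by push_cast; omega)]
            norm_num
          · rw [if_neg hsk2, hdiv]
            have harg : sk - c - (k : Int) * c = sk - ((k : Nat) + 1 : Int) * c := by
              push_cast; ring
            by_cases hge : PySem.Int.floordiv sk c ≥ (k : Int) + 1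
            · rw [if_pos (by omega), if_pos (by push_cast; omega), harg]
              push_cast
              ring_nf
            · rw [if_neg (by omega), if_neg (by push_cast; omega)]
              omega

-- B's per-group loop equals A's greedy loop on the corresponding replicated list
theorem altLoop_eq_greedy (L : List Int) (ks : List Int)
    (hcnt : ∀ c ∈ ks, 1 ≤ L.count c) (sk : Int) :
    altLoop (PySem.Dict.counter L) ks sk
      = solveGreedy (ks.flatMap (fun c => List.replicate (L.count c) c)) sk := by
  induction ks generalizing sk with
  | nil => simp [altLoop, solveGreedy]
  | cons c cs ih =>
    have hk : 1 ≤ L.count c := hcnt c (List.mem_cons_self)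
    simp only [List.flatMap_cons]
    rw [greedy_group c (L.count c) hk _ sk]
    simp only [altLoop, PySem.Dict.getD_counter]
    by_cases h1 : c > sk
    · simp [h1]
    · rw [if_neg h1, if_neg h1]
      by_cases h2 : c ≤ 0
      · rw [if_pos h2, if_pos h2, ih (fun c hc => hcnt c (List.mem_cons_of_mem _ hc))]
      · rw [if_neg h2, if_neg h2]
        by_cases h3 : PySem.Int.floordiv sk c ≥ (L.count c : Int)
        · rw [if_pos h3, if_pos h3, ih (fun c hc => hcnt c (List.mem_cons_of_mem _ hc))]
        · rw [if_neg h3, if_neg h3]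

-- the sorted flat cost list is the flatMap of replicates over the sorted distinct values
theorem sorted_eq_flat (L : List Int) :
    PySem.List.sorted L (fun x => x) false
      = (PySem.List.sorted (PySem.Set.ofList L) (fun x => x) false).flatMap
          (fun c => List.replicate (L.count c) c) := by
  set ks := PySem.List.sorted (PySem.Set.ofList L) (fun x => x) false with hks
  have hperm : ks.Perm (PySem.Set.ofList L) := PySem.List.sorted_perm _ _ _
  have hnd : ks.Nodup := hperm.nodup_iff.mpr (PySem.Set.nodup_ofList L)
  have hmem : ∀ c, c ∈ ks ↔ c ∈ L := by
    intro c
    rw [hperm.mem_iff, PySem.Set.mem_ofList]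
  have hlt : ks.Pairwise (· < ·) := PySem.List.sorted_ofList_pairwise_lt L
  exact PySem.List.sorted_id_eq_of_perm_of_pairwise _ _
    (flat_replicate_perm L ks hnd hmem) (flat_replicate_pairwise L ks hlt)

-- ===== VERDICT =====
theorem solve_spec : Claim_equal_solve := by
  intro inventory d1 d2 skip _ _
  unfold Spec_solve solve solve_alt
  simp only [fold_classify_a, fold_classify_b, List.nil_append,
    PySem.Dict.foldl_insert_getD_add_one_eq_counter]
  set L := (((inventory.map (fun x => PySem.Int.mod x (d1 + d2))).filter
      (fun r => !decide (0 < r ∧ r ≤ d1))).map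
      (fun r => PySem.Int.floordiv ((if r = 0 then d2 else r - d1) + d1 - 1) d1)) with hL
  rw [PySem.Dict.keys_counter, sorted_eq_flat L,
    altLoop_eq_greedy L _ ?_ skip]
  intro c hc
  have : c ∈ L := by
    have hperm : (PySem.List.sorted (PySem.Set.ofList L) (fun x => x) false).Perm
        (PySem.Set.ofList L) := PySem.List.sorted_perm _ _ _
    rw [hperm.mem_iff, PySem.Set.mem_ofList] at hc
    exact hc
  exact List.count_pos_iff.mpr this
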